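-- pv_equiv track=rewrite | github.com/GutKat/MA | xrRNA_design/neighbor_sampling/MBFV/infrared/infrared_save/infrared_s/infrared.py | _remove_subsumed_dependencies
-- ===== SOURCE A (Python) =====
-- def _remove_subsumed_dependencies(deps):
--     """Removes redundant dependencies that are subsumed by others
--     Removes all dependencies that are subsumed by other dependencies
--     in deps
--
--     Args:
--         deps: list of dependencies (where a dependency is a list of
--                                       indices)
--
--     Returns:
--         pruned list of dependencies
--     """
--     def sublist(xs, ys):
--         return all(x in ys for x in xs)
--
--     def subsumed(dep, deps):
--         return any(len(dep) < len(dep2) and sublist(dep, dep2)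
--                    for dep2 in deps)
--     deps = [dep for dep in deps if not subsumed(dep, deps)]
--     return deps
-- ===== SOURCE B (Python) =====
-- def _remove_subsumed_dependencies(deps):
--     """Prune deps subsumed by strictly longer deps: sort-by-length,
--     compare each dep only against strictly-later (longer) ones,
--     emit survivors in original input order."""
--     order = sorted(enumerate(deps), key=lambda t: len(t[1]))
--     dead = set()
--     for pos, (i, dep) in enumerate(order):
--         if any(len(dep) < len(dep2) and all(x in dep2 for x in dep)
--                for _, dep2 in order[pos + 1:]):
--             dead.add(i)
--     return [dep for i, dep in enumerate(deps) if i not in dead]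
-- ===== Notes on version B (the rewrite author's own statement) =====
-- stated objective: alternative
-- what changed: Instead of re-scanning the whole list for every dep with an inner all-pairs subsumed() test, B sorts (index, dep) pairs by length once, checks each dep only against the strictly-later (hence never shorter) entries of the sorted order to mark dead indices, and emits survivors by filtering the original enumeration, preserving input order.
import Mathlib
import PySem

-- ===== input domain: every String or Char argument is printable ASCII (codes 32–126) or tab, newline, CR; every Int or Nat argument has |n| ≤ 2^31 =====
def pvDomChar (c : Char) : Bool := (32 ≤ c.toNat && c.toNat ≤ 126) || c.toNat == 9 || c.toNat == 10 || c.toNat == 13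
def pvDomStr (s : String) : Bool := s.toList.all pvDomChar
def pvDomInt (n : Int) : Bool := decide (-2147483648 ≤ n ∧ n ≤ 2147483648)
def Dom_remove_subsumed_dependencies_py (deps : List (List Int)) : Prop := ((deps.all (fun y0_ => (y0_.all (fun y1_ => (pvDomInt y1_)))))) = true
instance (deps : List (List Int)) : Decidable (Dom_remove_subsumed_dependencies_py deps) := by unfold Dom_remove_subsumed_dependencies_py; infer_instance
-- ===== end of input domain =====

-- B sorts the deps by length once and compares each dep only against strictly-later
-- (hence no shorter) deps, emitting survivors in original order; a different traversal with the same result.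

-- ===== PORT A =====
def pvSublist (xs ys : List Int) : Bool := xs.all (fun x => ys.contains x)
def pvSubsumed (dep : List Int) (deps : List (List Int)) : Bool :=
  deps.any (fun dep2 => decide (dep.length < dep2.length) && pvSublist dep dep2)
def remove_subsumed_dependencies_py (deps : List (List Int)) : List (List Int) :=
  deps.filter (fun dep => !pvSubsumed dep deps)

-- ===== PORT B =====
-- 'any(... for _, dep2 in order[pos+1:])' — at each loop step 'rest' IS the slice order[pos+1:]
def pvAltHit (dep : List Int) (rest : List (Int × List Int)) : Bool :=
  rest.any (fun t => decide (dep.length < t.2.length) && dep.all (fun x => t.2.contains x))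
def pvAltLoop : List (Int × List Int) → PySem.Set Int → PySem.Set Int
  | [], dead => dead
  | (i, dep) :: rest, dead =>
      pvAltLoop rest (if pvAltHit dep rest then PySem.Set.add dead i else dead)
def remove_subsumed_dependencies_py_alt (deps : List (List Int)) : List (List Int) :=
  let order := PySem.List.sorted (PySem.List.enumerate deps) (fun t => t.2.length) false
  let dead := pvAltLoop order PySem.Set.empty
  (PySem.List.enumerate deps).filterMap
    (fun t => if PySem.Set.contains dead t.1 then none else some t.2)

-- ===== PRECONDITION & SPEC =====
def Spec_remove_subsumed_dependencies_py (deps : List (List Int)) (out : List (List Int)) : Prop := out = remove_subsumed_dependencies_py_alt deps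
instance (deps : List (List Int)) (out : List (List Int)) : Decidable (Spec_remove_subsumed_dependencies_py deps out) := by unfold Spec_remove_subsumed_dependencies_py; infer_instance

-- ===== CLAIM (what is proved, stated in full; the proofs are below) =====
def Claim_equal_remove_subsumed_dependencies_py : Prop := ∀ (deps : List (List Int)), Dom_remove_subsumed_dependencies_py deps → Spec_remove_subsumed_dependencies_py deps (remove_subsumed_dependencies_py deps)

-- ===== LEMMAS AND PROOFS =====

theorem pvAltHit_eq (deps : List (List Int)) (i : Int) (dep : List Int)
    (rest : List (Int × List Int))
    (h0 : ∀ t ∈ (i, dep) :: rest, t ∈ PySem.List.enumerate deps)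
    (h2 : ∀ t ∈ PySem.List.enumerate deps, t ∉ (i, dep) :: rest →
            ∀ u ∈ (i, dep) :: rest, t.2.length ≤ u.2.length) :
    pvAltHit dep rest = pvSubsumed dep deps := by
  apply Bool.eq_iff_iff.mpr
  simp only [pvAltHit, pvSubsumed, pvSublist, List.any_eq_true, Bool.and_eq_true,
    decide_eq_true_eq]
  constructor
  · rintro ⟨t, ht, hlt, hall⟩
    have hmem := h0 t (List.mem_cons_of_mem _ ht)
    rw [PySem.List.mem_enumerate_iff] at hmem
    obtain ⟨k, hk, hp⟩ := hmem
    refine ⟨t.2, ?_, hlt, hall⟩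
    rw [hp]
    exact List.getElem_mem hk
  · rintro ⟨dep2, hd2, hlt, hall⟩
    obtain ⟨k, hk, hdk⟩ := List.mem_iff_getElem.mp hd2
    have hp : (((0:Int) + k, dep2) : Int × List Int) ∈ PySem.List.enumerate deps := by
      rw [PySem.List.mem_enumerate_iff]
      exact ⟨k, hk, by rw [hdk]⟩
    by_cases hmem : (((0:Int) + k, dep2) : Int × List Int) ∈ (i, dep) :: rest
    · rcases List.mem_cons.mp hmem with he | hr
      · have hde : dep2 = dep := congrArg Prod.snd he
        rw [hde] at hlt; omega
      · exact ⟨_, hr, hlt, hall⟩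
    · have hle : dep2.length ≤ dep.length := h2 _ hp hmem (i, dep) List.mem_cons_self
      omega

theorem pvAltLoop_mem (deps : List (List Int)) :
    ∀ (l : List (Int × List Int)) (dead : PySem.Set Int),
    (∀ t ∈ l, t ∈ PySem.List.enumerate deps) →
    l.Pairwise (fun a b => a.2.length ≤ b.2.length) →
    (∀ t ∈ PySem.List.enumerate deps, t ∉ l → ∀ u ∈ l, t.2.length ≤ u.2.length) →
    ∀ j : Int, j ∈ pvAltLoop l dead ↔ j ∈ dead ∨ ∃ d, (j, d) ∈ l ∧ pvSubsumed d deps = true := by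
  intro l
  induction l with
  | nil => intro dead h0 h1 h2 j; simp [pvAltLoop]
  | cons hd tl ih =>
    obtain ⟨i, dep⟩ := hd
    intro dead h0 h1 h2 j
    have hhit := pvAltHit_eq deps i dep tl h0 h2
    have hpc := List.pairwise_cons.mp h1
    have h0' : ∀ t ∈ tl, t ∈ PySem.List.enumerate deps :=
      fun t ht => h0 t (List.mem_cons_of_mem _ ht)
    have h2' : ∀ t ∈ PySem.List.enumerate deps, t ∉ tl → ∀ u ∈ tl, t.2.length ≤ u.2.length := by
      intro t ht htn u hu
      by_cases he : t = (i, dep)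
      · subst he; exact hpc.1 u hu
      · exact h2 t ht (by simp [List.mem_cons, he, htn]) u (List.mem_cons_of_mem _ hu)
    rw [pvAltLoop, ih _ h0' hpc.2 h2' j]
    have hmemif : j ∈ (if pvAltHit dep tl then PySem.Set.add dead i else dead) ↔
        j ∈ dead ∨ (pvSubsumed dep deps = true ∧ j = i) := by
      rw [hhit]
      split_ifs with hc
      · simp [PySem.Set.mem_add, hc]
      · simp [hc]
    rw [hmemif]
    simp only [List.mem_cons, Prod.mk.injEq]
    constructor
    · rintro ((hj | ⟨hs, rfl⟩) | ⟨d, hd, hs⟩)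
      · exact Or.inl hj
      · exact Or.inr ⟨dep, Or.inl ⟨rfl, rfl⟩, hs⟩
      · exact Or.inr ⟨d, Or.inr hd, hs⟩
    · rintro (hj | ⟨d, (⟨rfl, rfl⟩ | hd), hs⟩)
      · exact Or.inl (Or.inl hj)
      · exact Or.inl (Or.inr ⟨hs, rfl⟩)
      · exact Or.inr ⟨d, hd, hs⟩

theorem pvDead_eq (deps : List (List Int)) (j : Int) (d : List Int)
    (h : (j, d) ∈ PySem.List.enumerate deps) :
    PySem.Set.contains
      (pvAltLoop (PySem.List.sorted (PySem.List.enumerate deps) (fun t => t.2.length) false)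
        PySem.Set.empty) j = pvSubsumed d deps := by
  apply Bool.eq_iff_iff.mpr
  rw [PySem.Set.contains_iff]
  rw [pvAltLoop_mem deps _ _
    (fun t ht => (PySem.List.mem_sorted _ _ _ _).mp ht)
    (PySem.List.sorted_pairwise _ _)
    (fun t ht htn u _ => absurd ((PySem.List.mem_sorted _ _ _ _).mpr ht) htn) j]
  constructor
  · rintro (habs | ⟨d', hd', hs⟩)
    · simp [PySem.Set.empty] at habs
    · have hd'' := (PySem.List.mem_sorted _ _ _ _).mp hd'
      rw [PySem.List.mem_enumerate_iff] at hd'' h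
      obtain ⟨k, hk, hp⟩ := hd''
      obtain ⟨k', hk', hp'⟩ := h
      obtain ⟨hj1, hd1⟩ := Prod.mk.inj hp
      obtain ⟨hj2, hd2⟩ := Prod.mk.inj hp'
      have hkk : k = k' := by omega
      subst hkk
      rw [hd1, ← hd2] at hs
      exact hs
  · intro hs
    exact Or.inr ⟨d, (PySem.List.mem_sorted _ _ _ _).mpr h, hs⟩

theorem pvFilterMap_enumerate (dead : PySem.Set Int) (g : List Int → Bool) :
    ∀ (xs : List (List Int)) (s : Int),
    (∀ t ∈ PySem.List.enumerate xs s, PySem.Set.contains dead t.1 = g t.2) →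
    (PySem.List.enumerate xs s).filterMap
        (fun t => if PySem.Set.contains dead t.1 then none else some t.2)
      = xs.filter (fun dd => !g dd) := by
  intro xs
  induction xs with
  | nil => intro s _; simp [PySem.List.enumerate_nil]
  | cons x xs ih =>
    intro s hyp
    rw [PySem.List.enumerate_cons, List.filterMap_cons, List.filter_cons]
    have hx : PySem.Set.contains dead s = g x :=
      hyp (s, x) (by rw [PySem.List.enumerate_cons]; exact List.mem_cons_self)
    have htl := ih (s + 1) (fun t ht => hyp t (by rw [PySem.List.enumerate_cons]; exact List.mem_cons_of_mem _ ht))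
    rw [hx]
    cases hgx : g x with
    | true => simpa using htl
    | false => simpa using htl

-- ===== VERDICT (by name: the statement is the Claim_ definition above) =====
theorem remove_subsumed_dependencies_py_spec : Claim_equal_remove_subsumed_dependencies_py := by
  intro deps _
  unfold Spec_remove_subsumed_dependencies_py
  simp only [remove_subsumed_dependencies_py, remove_subsumed_dependencies_py_alt]
  exact (pvFilterMap_enumerate _ (fun dd => pvSubsumed dd deps) deps 0
    (fun t ht => pvDead_eq deps t.1 t.2 ht)).symm
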